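-- pv_equiv track=rewrite | github.com/wboeker/PythonPractice | Homework_Five.py | build_mountain
-- ===== SOURCE A (Python) =====
-- def build_mountain(num):
-- 	num_list = []
-- 	for i in range(1,num):
-- 		num_list.append(i)
-- 	length = len(num_list)
-- 	for j in range(num):
-- 		num_list.append(num-j)
-- 	return num_list
-- ===== SOURCE B (Python) =====
-- def build_mountain(num):
--     return [num - abs(i - (num - 1)) for i in range(2 * num - 1)]
-- ===== Notes on version B (the rewrite author's own statement) =====
-- stated objective: idiomatic
-- what changed: Replaced the two appending loops (ascending 1..num-1 then descending num..1) by one closed-form comprehension over range(2*num-1) with an abs-based peak formula.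
import Mathlib
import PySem

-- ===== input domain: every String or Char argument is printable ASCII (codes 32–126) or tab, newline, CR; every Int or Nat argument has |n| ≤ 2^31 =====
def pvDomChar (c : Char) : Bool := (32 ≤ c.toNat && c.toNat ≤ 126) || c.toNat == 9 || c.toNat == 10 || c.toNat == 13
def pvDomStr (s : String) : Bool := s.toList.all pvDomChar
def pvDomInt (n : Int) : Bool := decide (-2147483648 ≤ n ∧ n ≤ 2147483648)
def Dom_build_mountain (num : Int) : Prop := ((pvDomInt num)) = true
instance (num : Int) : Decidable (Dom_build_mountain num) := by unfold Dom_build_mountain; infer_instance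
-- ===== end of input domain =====

-- B replaces A's two appending loops by one closed-form per-index formula num - |i - (num-1)| over range(2*num-1); more idiomatic, same cost.


-- ===== PORT A =====
def build_mountain (num : Int) : List Int :=
  let num_list : List Int := []
  let num_list := (PySem.List.pyRange 1 num 1).foldl (fun acc i => acc ++ [i]) num_list
  let _length := num_list.length
  let num_list := (PySem.List.pyRange 0 num 1).foldl (fun acc j => acc ++ [num - j]) num_list
  num_list

-- ===== PORT B =====
def build_mountain_alt (num : Int) : List Int :=
  (PySem.List.pyRange 0 (2 * num - 1) 1).map (fun i => num - |i - (num - 1)|)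

-- ===== PRECONDITION & SPEC =====
def Spec_build_mountain (num : Int) (out : List Int) : Prop := out = build_mountain_alt num
instance (num : Int) (out : List Int) : Decidable (Spec_build_mountain num out) := by unfold Spec_build_mountain; infer_instance

-- ===== CLAIM (what is proved, stated in full; the proofs are below) =====
def Claim_equal_build_mountain : Prop := ∀ (num : Int), Dom_build_mountain num → Spec_build_mountain num (build_mountain num)

-- ===== LEMMAS AND PROOFS =====

theorem pv_foldl_append (f : Int → Int) (l : List Int) (init : List Int) :
    l.foldl (fun acc x => acc ++ [f x]) init = init ++ l.map f := by
  induction l generalizing init with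
  | nil => simp
  | cons x xs ih => simp [List.foldl, ih]

-- ===== VERDICT (by name: the statement is the Claim_ definition above) =====
theorem build_mountain_spec : Claim_equal_build_mountain := by
  intro num _
  show build_mountain num = build_mountain_alt num
  unfold build_mountain build_mountain_alt
  rw [show (fun (acc : List Int) (i : Int) => acc ++ [i]) = (fun acc i => acc ++ [id i]) from rfl]
  simp only [pv_foldl_append]
  simp only [PySem.List.pyRange_one, List.map_map, List.nil_append]
  apply List.ext_getElem
  · simp; omega
  · intro k h1 h2
    rcases lt_or_ge k ((num - 1).toNat * 1) with hk | hk
    · rw [List.getElem_append_left (by simpa using hk)]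
      simp only [List.getElem_map, List.getElem_range, Function.comp, id]
      have hk' : (k : Int) < num - 1 := by omega
      rw [abs_of_nonpos (by omega)]
      ring
    · rw [List.getElem_append_right (by simpa using hk)]
      simp only [List.getElem_map, List.getElem_range, Function.comp]
      have hlen : (List.map (fun k => 1 + (k:Int)) (List.range (num - 1).toNat)).length = (num - 1).toNat := by simp
      rw [abs_of_nonneg (by simp at h2 ⊢; omega)]
      simp at h1 h2 ⊢
      omega
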